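-- pv_equiv track=rewrite | github.com/nic506/binning_tool | edge_detection_6.py | get_anchor_points_between
-- ===== SOURCE A (Python) =====
-- def get_anchor_points_between(poly_coords, start_idx, end_idx):
--     n_polygon_coords = len(poly_coords)
--     coords_between = []
--     idx = start_idx
--     coords_between.append(poly_coords[idx])
--
--     while True:
--         idx = (idx + 1) % n_polygon_coords
--         coords_between.append(poly_coords[idx])
--         if idx == end_idx:
--             break
--
--     return coords_between
-- ===== SOURCE B (Python) =====
-- def get_anchor_points_between(poly_coords, start_idx, end_idx):
--     first = poly_coords[start_idx]
--     n = len(poly_coords)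
--     s = start_idx % n
--     if s < end_idx:
--         return [first] + poly_coords[s + 1 : end_idx + 1]
--     return [first] + poly_coords[s + 1 :] + poly_coords[: end_idx + 1]
-- ===== Notes on version B (the rewrite author's own statement) =====
-- stated objective: alternative
-- what changed: B replaces A's element-by-element modular walk (while-True with an equality break) by direct list slicing: it normalizes the start index and returns the first element plus one contiguous slice (no wrap) or two concatenated slices (tail-of-list plus head-of-list) -- no per-element index arithmetic or loop at all.
import Mathlib
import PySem

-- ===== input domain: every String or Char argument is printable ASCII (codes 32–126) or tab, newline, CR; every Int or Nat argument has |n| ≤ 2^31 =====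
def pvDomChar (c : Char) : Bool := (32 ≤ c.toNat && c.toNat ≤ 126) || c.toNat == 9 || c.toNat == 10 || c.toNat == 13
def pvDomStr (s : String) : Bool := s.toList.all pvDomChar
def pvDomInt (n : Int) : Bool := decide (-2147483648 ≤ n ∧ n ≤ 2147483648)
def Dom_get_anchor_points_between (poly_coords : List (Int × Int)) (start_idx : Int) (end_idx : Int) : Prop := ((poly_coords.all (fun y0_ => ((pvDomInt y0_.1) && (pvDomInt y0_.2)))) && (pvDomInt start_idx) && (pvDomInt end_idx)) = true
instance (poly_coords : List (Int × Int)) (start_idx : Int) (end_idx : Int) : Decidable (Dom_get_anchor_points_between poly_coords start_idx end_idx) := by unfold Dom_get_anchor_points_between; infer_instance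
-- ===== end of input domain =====

-- B replaces A's element-by-element modular walk by list slicing: first element plus one
-- contiguous slice (no wrap) or two concatenated slices (tail + head); same cost, different algorithm.

-- ===== PORT A =====
-- A's while-True loop; fuel = poly.length is enough iterations inside Pre_ (the loop stops
-- after at most n steps when end_idx is a canonical index); outside Pre_ Python diverges/raises.
def pvALoop (poly : List (Int × Int)) (n endI : Int) : Nat → Int → List (Int × Int) → List (Int × Int)
  | 0, _, acc => acc
  | fuel+1, idx, acc =>
    let idx' := PySem.Int.mod (idx + 1) n
    match PySem.List.pyGet? poly idx' with
    | none => acc   -- IndexError (unreachable: idx' is a canonical index when n > 0)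
    | some x => if idx' = endI then acc ++ [x] else pvALoop poly n endI fuel idx' (acc ++ [x])

def get_anchor_points_between (poly_coords : List (Int × Int)) (start_idx : Int) (end_idx : Int) : List (Int × Int) :=
  let n : Int := poly_coords.length
  match PySem.List.pyGet? poly_coords start_idx with
  | none => []   -- IndexError, excluded by Pre_
  | some x => pvALoop poly_coords n end_idx poly_coords.length start_idx [x]

-- ===== PORT B =====
def get_anchor_points_between_alt (poly_coords : List (Int × Int)) (start_idx : Int) (end_idx : Int) : List (Int × Int) :=
  match PySem.List.pyGet? poly_coords start_idx with
  | none => []   -- IndexError, excluded by Pre_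
  | some first =>
    let n : Int := poly_coords.length
    let s := PySem.Int.mod start_idx n
    if s < end_idx then
      [first] ++ PySem.List.slice poly_coords (some (s + 1)) (some (end_idx + 1))
    else
      [first] ++ PySem.List.slice poly_coords (some (s + 1)) none
              ++ PySem.List.slice poly_coords none (some (end_idx + 1))

-- ===== PRECONDITION & SPEC =====
-- Pre_ excludes exactly the inputs where Python A does not return: empty poly_coords or
-- out-of-range start_idx (IndexError), and end_idx outside [0, n) (the break never fires: A diverges).
def Pre_get_anchor_points_between (poly_coords : List (Int × Int)) (start_idx : Int) (end_idx : Int) : Prop :=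
  poly_coords ≠ [] ∧ -(poly_coords.length : Int) ≤ start_idx ∧ start_idx < (poly_coords.length : Int) ∧
  0 ≤ end_idx ∧ end_idx < (poly_coords.length : Int)
instance (poly_coords : List (Int × Int)) (start_idx : Int) (end_idx : Int) : Decidable (Pre_get_anchor_points_between poly_coords start_idx end_idx) := by unfold Pre_get_anchor_points_between; infer_instance

def pvWitness_get_anchor_points_between : (List (Int × Int)) × Int × Int := ([(1, 2), (3, 4), (5, 6)], 2, 0)

def Spec_get_anchor_points_between (poly_coords : List (Int × Int)) (start_idx : Int) (end_idx : Int) (out : List (Int × Int)) : Prop := out = get_anchor_points_between_alt poly_coords start_idx end_idx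
instance (poly_coords : List (Int × Int)) (start_idx : Int) (end_idx : Int) (out : List (Int × Int)) : Decidable (Spec_get_anchor_points_between poly_coords start_idx end_idx out) := by unfold Spec_get_anchor_points_between; infer_instance

-- ===== CLAIM (what is proved, stated in full; the proofs are below) =====
def Claim_equal_get_anchor_points_between : Prop := ∀ (poly_coords : List (Int × Int)) (start_idx : Int) (end_idx : Int), Dom_get_anchor_points_between poly_coords start_idx end_idx → Pre_get_anchor_points_between poly_coords start_idx end_idx → Spec_get_anchor_points_between poly_coords start_idx end_idx (get_anchor_points_between poly_coords start_idx end_idx)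

-- ===== LEMMAS AND PROOFS =====

-- the ladder of A's loop: elements at indices (idx+1)%n, (idx+2)%n, …, k of them
def pvSeg (poly : List (Int × Int)) (n : Int) : Int → Nat → List (Int × Int)
  | _, 0 => []
  | idx, k+1 => PySem.List.pyGetD poly ((idx + 1) % (poly.length : Int)) (0, 0) :: pvSeg poly n ((idx + 1) % n) k

-- number of loop iterations of A, in closed form
def pvCount (n e idx : Int) : Nat := (if (e - idx) % n = 0 then n else (e - idx) % n).toNat

theorem pvEmodSubRight (a b n : Int) : (a - b % n) % n = (a - b) % n := by
  conv_lhs => rw [Int.sub_emod]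
  rw [Int.emod_emod_of_dvd _ (dvd_refl n), ← Int.sub_emod]

theorem pvEmodAddLeft (a b n : Int) : (a % n + b) % n = (a + b) % n := by
  conv_lhs => rw [Int.add_emod]
  rw [Int.emod_emod_of_dvd _ (dvd_refl n), ← Int.add_emod]

theorem pvEmodZeroIff {a b n : Int} (hn : 0 < n) (ha : 0 ≤ a) (ha' : a < n) (hb : 0 ≤ b) (hb' : b < n) :
    (a - b) % n = 0 ↔ a = b := by
  constructor
  · intro h
    have hd : n ∣ a - b := Int.dvd_of_emod_eq_zero h
    have := Int.eq_zero_of_abs_lt_dvd hd (abs_lt.mpr ⟨by omega, by omega⟩)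
    omega
  · intro h; simp [h]

theorem pvNegOneMod {n : Int} (hn : 0 < n) : (-1 : Int) % n = n - 1 := by
  have h := Int.add_mul_emod_self_left (-1) n 1
  rw [show (-1 + n * 1 : Int) = n - 1 by ring] at h
  rw [← h, Int.emod_eq_of_lt (by omega) (by omega)]

theorem pvEmodSubOne {c n : Int} (hn : 0 < n) : (c - 1) % n = (c % n - 1) % n := by
  conv_rhs => rw [Int.sub_emod, Int.emod_emod_of_dvd _ (dvd_refl n), ← Int.sub_emod]

theorem pvGetSome {poly : List (Int × Int)} {i : Int} (h0 : 0 ≤ i) (h1 : i < (poly.length : Int)) :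
    PySem.List.pyGet? poly i = some (PySem.List.pyGetD poly i (0, 0)) := by
  rw [PySem.List.pyGet?_eq_some_getElem poly h0 h1, PySem.List.pyGetD_eq_getElem poly (0, 0) h0 h1]

theorem pvCount_pos {n e idx : Int} (hn : 0 < n) : 1 ≤ pvCount n e idx := by
  unfold pvCount
  have h0 : 0 ≤ (e - idx) % n := Int.emod_nonneg _ (by omega)
  split <;> omega

theorem pvCount_le {n e idx : Int} (hn : 0 < n) : (pvCount n e idx : Int) ≤ n := by
  unfold pvCount
  have h0 : 0 ≤ (e - idx) % n := Int.emod_nonneg _ (by omega)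
  have h1 : (e - idx) % n < n := Int.emod_lt_of_pos _ hn
  split <;> omega

-- step relation of the closed-form count along the loop
theorem pvCount_step {n e idx : Int}
    (hn : 0 < n) (he0 : 0 ≤ e) (he1 : e < n) :
    (((idx + 1) % n = e) ↔ pvCount n e idx = 1) ∧
    ((idx + 1) % n ≠ e →
      pvCount n e ((idx + 1) % n) = pvCount n e idx - 1 ∧
      2 ≤ pvCount n e idx) := by
  set idx' : Int := (idx + 1) % n with hidx'
  have hi0 : 0 ≤ idx' := Int.emod_nonneg _ (by omega)
  have hi1 : idx' < n := Int.emod_lt_of_pos _ hn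
  have hc0 : 0 ≤ (e - idx) % n := Int.emod_nonneg _ (by omega)
  have hc1 : (e - idx) % n < n := Int.emod_lt_of_pos _ hn
  have hstep : (e - idx') % n = ((e - idx) % n - 1) % n := by
    rw [hidx', pvEmodSubRight, show e - (idx + 1) = (e - idx) - 1 by ring, pvEmodSubOne hn]
  have hiff : idx' = e ↔ (e - idx') % n = 0 := by
    rw [show (e - idx') % n = 0 ↔ e = idx' from pvEmodZeroIff hn he0 he1 hi0 hi1]
    exact eq_comm
  by_cases hc : (e - idx) % n = 0
  · have hm1 : ((e - idx) % n - 1) % n = n - 1 := by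
      rw [hc, show (0 : Int) - 1 = -1 by ring, pvNegOneMod hn]
    constructor
    · constructor
      · intro heq
        have h0 : (e - idx') % n = 0 := hiff.mp heq
        rw [hstep, hm1] at h0
        unfold pvCount; rw [hc]; simp <;> omega
      · intro h1
        unfold pvCount at h1; rw [hc] at h1; simp at h1
        apply hiff.mpr
        rw [hstep, hm1]; omega
    · intro hne
      have hne0 : (e - idx') % n ≠ 0 := fun h => hne (hiff.mpr h)
      rw [hstep, hm1] at hne0
      have hn2 : 2 ≤ n := by omega
      constructor
      · unfold pvCount
        rw [hstep, hm1, hc]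
        rw [if_neg (by omega : ¬ (n - 1 : Int) = 0)]
        simp <;> omega
      · unfold pvCount; rw [hc]; simp <;> omega
  · have hcpos : 1 ≤ (e - idx) % n := by omega
    constructor
    · constructor
      · intro heq
        have h0 : (e - idx') % n = 0 := hiff.mp heq
        rw [hstep] at h0
        have hsm : ((e - idx) % n - 1) % n = (e - idx) % n - 1 := Int.emod_eq_of_lt (by omega) (by omega)
        rw [hsm] at h0
        unfold pvCount; rw [if_neg hc]; omega
      · intro h1
        unfold pvCount at h1; rw [if_neg hc] at h1
        have hc1' : (e - idx) % n = 1 := by omega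
        apply hiff.mpr
        rw [hstep, hc1']; simp
    · intro hne
      have hne0 : (e - idx') % n ≠ 0 := fun h => hne (hiff.mpr h)
      rw [hstep] at hne0
      have hsmall : ((e - idx) % n - 1) % n = (e - idx) % n - 1 := Int.emod_eq_of_lt (by omega) (by omega)
      rw [hsmall] at hne0
      constructor
      · unfold pvCount
        rw [hstep, hsmall, if_neg hc, if_neg hne0]
        omega
      · unfold pvCount; rw [if_neg hc]; omega

-- A's loop computes acc ++ pvSeg, provided fuel ≥ pvCount
theorem pvALoop_eq (poly : List (Int × Int)) (e : Int)
    (hn : 0 < (poly.length : Int)) (he0 : 0 ≤ e) (he1 : e < (poly.length : Int)) :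
    ∀ (fuel : Nat) (idx : Int) (acc : List (Int × Int)),
      pvCount (poly.length : Int) e idx ≤ fuel →
      pvALoop poly (poly.length : Int) e fuel idx acc =
        acc ++ pvSeg poly (poly.length : Int) idx (pvCount (poly.length : Int) e idx) := by
  intro fuel
  induction fuel with
  | zero => intro idx acc hle; exact absurd hle (by have := pvCount_pos (e := e) (idx := idx) hn; omega)
  | succ f ih =>
    intro idx acc hle
    have hmod : PySem.Int.mod (idx + 1) (poly.length : Int) = (idx + 1) % (poly.length : Int) :=
      PySem.Int.mod_eq_emod_of_pos hn
    have hi0 : 0 ≤ (idx + 1) % (poly.length : Int) := Int.emod_nonneg _ (by omega)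
    have hi1 : (idx + 1) % (poly.length : Int) < (poly.length : Int) := Int.emod_lt_of_pos _ hn
    obtain ⟨hiff, hstep⟩ := pvCount_step (n := (poly.length : Int)) (e := e) (idx := idx) hn he0 he1
    rw [pvALoop]
    simp only [hmod, pvGetSome hi0 hi1]
    by_cases heq : (idx + 1) % (poly.length : Int) = e
    · rw [if_pos heq]
      have hk1 : pvCount (poly.length : Int) e idx = 1 := hiff.mp heq
      rw [hk1]
      rfl
    · rw [if_neg heq]
      obtain ⟨hk', hk2⟩ := hstep heq
      rw [ih _ _ (by omega)]
      have hkeq : pvCount (poly.length : Int) e idx = (pvCount (poly.length : Int) e idx - 1) + 1 := by omega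
      rw [hk', hkeq, pvSeg, List.append_assoc]
      rfl

-- the ladder as a map of modular indices
theorem pvMap_eq_seg (poly : List (Int × Int)) (hn : 0 < (poly.length : Int)) :
    ∀ (k : Nat) (idx : Int),
      (List.range k).map (fun (j : Nat) => PySem.List.pyGetD poly ((idx + ((j : Int) + 1)) % (poly.length : Int)) (0, 0)) =
        pvSeg poly (poly.length : Int) idx k := by
  intro k
  induction k with
  | zero => intro idx; rfl
  | succ k ih =>
    intro idx
    rw [List.range_succ_eq_map, List.map_cons, List.map_map, pvSeg]
    congr 1
    rw [← ih (((idx + 1) % (poly.length : Int)))]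
    apply List.map_congr_left
    intro j _
    simp only [Function.comp]
    congr 1
    rw [pvEmodAddLeft]
    push_cast
    ring_nf

-- a run of consecutive (non-wrapping) indices is a drop/take
theorem pvMapGet (poly : List (Int × Int)) (a : Int) (k : Nat)
    (ha : 0 ≤ a) (hk : a + (k : Int) ≤ (poly.length : Int)) :
    (List.range k).map (fun (j : Nat) => PySem.List.pyGetD poly (a + (j : Int)) (0, 0)) =
      (poly.drop a.toNat).take k := by
  apply List.ext_getElem
  · simp
    omega
  · intro i h1 h2
    simp only [List.length_map, List.length_range] at h1
    simp only [List.getElem_map, List.getElem_range, List.getElem_take, List.getElem_drop]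
    rw [PySem.List.pyGetD_eq_getElem poly (0, 0) (by omega) (by push_cast; omega)]
    congr 1
    omega

-- ===== VERDICT (by name: the statement is the Claim_ definition above) =====
theorem get_anchor_points_between_spec : Claim_equal_get_anchor_points_between := by
  intro poly s e _hdom hpre
  obtain ⟨hne, hs0, hs1, he0, he1⟩ := hpre
  have hn : 0 < (poly.length : Int) := by
    have : poly.length ≠ 0 := fun h => hne (List.length_eq_zero_iff.mp h)
    omega
  unfold Spec_get_anchor_points_between get_anchor_points_between get_anchor_points_between_alt
  cases hget : PySem.List.pyGet? poly s with
  | none => rfl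
  | some x =>
    simp only []
    set si : Int := PySem.Int.mod s (poly.length : Int) with hsidef
    have hsi : si = s % (poly.length : Int) := PySem.Int.mod_eq_emod_of_pos hn
    have hsi0 : 0 ≤ si := by rw [hsi]; exact Int.emod_nonneg _ (by omega)
    have hsi1 : si < (poly.length : Int) := by rw [hsi]; exact Int.emod_lt_of_pos _ hn
    set K : Nat := pvCount (poly.length : Int) e s with hKdef
    rw [pvALoop_eq poly e hn he0 he1 poly.length s [x]
        (by have := pvCount_le (e := e) (idx := s) hn; omega)]
    rw [← pvMap_eq_seg poly hn K s]
    have hfun : ∀ j ∈ List.range K,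
        PySem.List.pyGetD poly ((s + ((j : Int) + 1)) % (poly.length : Int)) (0, 0) =
        PySem.List.pyGetD poly ((si + 1 + (j : Int)) % (poly.length : Int)) (0, 0) := by
      intro j _
      congr 1
      rw [hsi]
      conv_rhs => rw [show s % (poly.length : Int) + 1 + (j : Int)
          = s % (poly.length : Int) + (1 + (j : Int)) from by ring, pvEmodAddLeft]
      ring_nf
    rw [List.map_congr_left hfun]
    have hmods : (e - s) % (poly.length : Int) = (e - si) % (poly.length : Int) := by rw [hsi, pvEmodSubRight]
    by_cases hlt : si < e
    · rw [if_pos hlt]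
      have hval : (e - si) % (poly.length : Int) = e - si := Int.emod_eq_of_lt (by omega) (by omega)
      have hK : (K : Int) = e - si := by
        rw [hKdef]; unfold pvCount
        rw [hmods, hval, if_neg (by omega : ¬ (e - si : Int) = 0)]
        omega
      have hid : ∀ j ∈ List.range K,
          PySem.List.pyGetD poly ((si + 1 + (j : Int)) % (poly.length : Int)) (0, 0) =
          PySem.List.pyGetD poly ((si + 1) + (j : Int)) (0, 0) := by
        intro j hj
        rw [List.mem_range] at hj
        congr 1
        exact Int.emod_eq_of_lt (by omega) (by omega)
      rw [List.map_congr_left hid, pvMapGet poly (si + 1) K (by omega) (by omega)]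
      rw [PySem.List.slice_toNat poly (by omega : (0:Int) ≤ si + 1) (by omega : (0:Int) ≤ e + 1)]
      have hKval : K = (e + 1).toNat - (si + 1).toNat := by omega
      rw [hKval]
    · rw [if_neg hlt]
      have hK : (K : Int) = (poly.length : Int) + e - si := by
        rw [hKdef]; unfold pvCount
        rw [hmods]
        by_cases heq : si = e
        · rw [heq, sub_self, Int.zero_emod, if_pos rfl]; omega
        · have hval : (e - si) % (poly.length : Int) = e - si + (poly.length : Int) := by
            conv_lhs => rw [show e - si = (e - si + (poly.length : Int)) + (poly.length : Int) * (-1) from by ring]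
            rw [Int.add_mul_emod_self_left]
            exact Int.emod_eq_of_lt (by omega) (by omega)
          rw [hval, if_neg (by omega)]
          omega
      set k1 : Nat := ((poly.length : Int) - 1 - si).toNat with hk1
      set k2 : Nat := (e + 1).toNat with hk2
      have hsplit : K = k1 + k2 := by omega
      rw [hsplit, List.range_add, List.map_append, List.map_map]
      have hpart1 : (List.range k1).map (fun (j : Nat) => PySem.List.pyGetD poly ((si + 1 + (j : Int)) % (poly.length : Int)) (0, 0)) =
          PySem.List.slice poly (some (si + 1)) none := by
        have hid : ∀ j ∈ List.range k1,
            PySem.List.pyGetD poly ((si + 1 + (j : Int)) % (poly.length : Int)) (0, 0) =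
            PySem.List.pyGetD poly ((si + 1) + (j : Int)) (0, 0) := by
          intro j hj
          rw [List.mem_range] at hj
          congr 1
          exact Int.emod_eq_of_lt (by omega) (by omega)
        rw [List.map_congr_left hid, pvMapGet poly (si + 1) k1 (by omega) (by omega)]
        rw [PySem.List.slice_from poly (by omega : (0:Int) ≤ si + 1)]
        apply List.take_of_length_le
        simp
        omega
      have hpart2 : (List.range k2).map
          ((fun (j : Nat) => PySem.List.pyGetD poly ((si + 1 + (j : Int)) % (poly.length : Int)) (0, 0)) ∘ (k1 + ·)) =
          PySem.List.slice poly none (some (e + 1)) := by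
        have hid : ∀ j ∈ List.range k2,
            ((fun (j : Nat) => PySem.List.pyGetD poly ((si + 1 + (j : Int)) % (poly.length : Int)) (0, 0)) ∘ (k1 + ·)) j =
            PySem.List.pyGetD poly ((0 : Int) + (j : Int)) (0, 0) := by
          intro j hj
          rw [List.mem_range] at hj
          simp only [Function.comp]
          congr 1
          have : si + 1 + ((k1 + j : Nat) : Int) = (j : Int) + (poly.length : Int) * 1 := by push_cast; omega
          rw [this, Int.add_mul_emod_self_left, Int.emod_eq_of_lt (by omega) (by omega)]
          ring
        rw [List.map_congr_left hid, pvMapGet poly 0 k2 le_rfl (by omega)]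
        rw [PySem.List.slice_to poly (by omega : (0:Int) ≤ e + 1)]
        simp
        omega
      rw [hpart1, hpart2, ← List.append_assoc]
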